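-- pv_equiv track=rewrite | github.com/ismailwedihaji/DT2119-Lab1 | lab3_proto.py | words2phones
-- ===== SOURCE A (Python) =====
-- def words2phones(wordList, pronDict, addSilence=True, addShortPause=True):
--     """
--     Converts word-level transcription into phone-level transcription,
--     adding optional silence and short pauses.
--
--     Args:
--        wordList: list of word strings (e.g. ['four', 'three'])
--        pronDict: dictionary mapping words to phoneme lists
--        addSilence: if True, add initial and final silence
--        addShortPause: if True, add short pause model 'sp' between words
--
--     Returns:
--        List of phonemes, e.g. ['sil', 'f', 'ao', 'r', 'sp', 'th', 'r', 'iy', 'sil']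
--     """
--     phoneList = []
--
--     for i, word in enumerate(wordList):
--         word = word.lower()
--         if word not in pronDict:
--             raise ValueError(f"Word '{word}' not in pronunciation dictionary.")
--
--         phones = pronDict[word]
--         phoneList.extend(phones)
--
--         if addShortPause and i != len(wordList) - 1:
--             phoneList.append('sp')
--
--     if addSilence:
--         phoneList = ['sil'] + phoneList + ['sil']
--
--     return phoneList
-- ===== SOURCE B (Python) =====
-- def words2phones(wordList, pronDict, addSilence=True, addShortPause=True):
--     # Build the per-word phoneme groups first (validating left to right),
--     # then join them with 'sp' as a separator, then wrap in 'sil'.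
--     groups = []
--     for w in wordList:
--         key = w.lower()
--         if key not in pronDict:
--             raise ValueError(f"Word '{key}' not in pronunciation dictionary.")
--         groups.append(pronDict[key])
--     if addShortPause and groups:
--         groups = groups[:1] + [['sp'] + g for g in groups[1:]]
--     core = [p for g in groups for p in g]
--     return ['sil'] + core + ['sil'] if addSilence else core
-- ===== Notes on version B (the rewrite author's own statement) =====
-- stated objective: alternative
-- what changed: B first builds the list of per-word phoneme groups, then flattens them with 'sp' as a separator prepended to every group but the first (a separator-join), instead of A's single index-tracking loop that appends 'sp' after every word except the last.
import Mathlib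
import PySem

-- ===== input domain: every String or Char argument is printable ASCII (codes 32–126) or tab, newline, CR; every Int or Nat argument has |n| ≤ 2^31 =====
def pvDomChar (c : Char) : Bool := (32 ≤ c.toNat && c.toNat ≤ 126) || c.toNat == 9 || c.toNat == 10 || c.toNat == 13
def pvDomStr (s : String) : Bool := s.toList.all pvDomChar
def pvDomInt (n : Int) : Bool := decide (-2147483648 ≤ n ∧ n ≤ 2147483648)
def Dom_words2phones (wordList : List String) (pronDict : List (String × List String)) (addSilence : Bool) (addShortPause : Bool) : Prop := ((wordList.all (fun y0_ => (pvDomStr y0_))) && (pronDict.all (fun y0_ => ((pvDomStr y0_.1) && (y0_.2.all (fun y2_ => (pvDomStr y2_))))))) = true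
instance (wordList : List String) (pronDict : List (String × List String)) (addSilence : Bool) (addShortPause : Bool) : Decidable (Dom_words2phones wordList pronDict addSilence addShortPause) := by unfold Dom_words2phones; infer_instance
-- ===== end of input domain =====

-- B rebuilds the same phone list by a separator-join of pre-built per-word groups (alternative decomposition, same cost).

-- first-match association-list lookup (Python 'pronDict[word]'); none = KeyError, excluded by Pre_
def pvLookup (pronDict : List (String × List String)) (w : String) : List String :=
  ((pronDict.find? (fun p => p.1 == w)).map Prod.snd).getD []

-- ===== PORT A =====
def words2phones (wordList : List String) (pronDict : List (String × List String)) (addSilence : Bool) (addShortPause : Bool) : List String :=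
  let phoneList := (PySem.List.enumerate wordList).foldl (fun acc iw =>
    let word := PySem.Str.lower iw.2
    let phones := pvLookup pronDict word
    let acc2 := acc ++ phones
    if addShortPause && iw.1 != (wordList.length : Int) - 1 then acc2 ++ ["sp"] else acc2) []
  if addSilence then ["sil"] ++ phoneList ++ ["sil"] else phoneList

-- ===== PORT B =====
def words2phones_alt (wordList : List String) (pronDict : List (String × List String)) (addSilence : Bool) (addShortPause : Bool) : List String :=
  let groups := wordList.map (fun w => pvLookup pronDict (PySem.Str.lower w))
  let groups2 := if addShortPause && !groups.isEmpty
    then groups.take 1 ++ (groups.drop 1).map (fun g => ["sp"] ++ g)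
    else groups
  let core := groups2.flatten
  if addSilence then ["sil"] ++ core ++ ["sil"] else core

-- ===== PRECONDITION & SPEC =====
-- Pre_ excludes exactly the inputs where some (lowercased) word is missing from pronDict: there Python A raises ValueError (B raises too).
def Pre_words2phones (wordList : List String) (pronDict : List (String × List String)) (addSilence : Bool) (addShortPause : Bool) : Prop :=
  ∀ w ∈ wordList, (pronDict.find? (fun p => p.1 == PySem.Str.lower w)).isSome = true
instance (wordList : List String) (pronDict : List (String × List String)) (addSilence : Bool) (addShortPause : Bool) : Decidable (Pre_words2phones wordList pronDict addSilence addShortPause) := by unfold Pre_words2phones; infer_instance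

def pvWitness_words2phones : List String × (List (String × List String)) × Bool × Bool :=
  (["Four", "three"], [("four", ["f", "ao", "r"]), ("three", ["th", "r", "iy"])], true, true)

def Spec_words2phones (wordList : List String) (pronDict : List (String × List String)) (addSilence : Bool) (addShortPause : Bool) (out : List String) : Prop := out = words2phones_alt wordList pronDict addSilence addShortPause
instance (wordList : List String) (pronDict : List (String × List String)) (addSilence : Bool) (addShortPause : Bool) (out : List String) : Decidable (Spec_words2phones wordList pronDict addSilence addShortPause out) := by unfold Spec_words2phones; infer_instance

-- ===== CLAIM (what is proved, stated in full; the proofs are below) =====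
def Claim_equal_words2phones : Prop := ∀ (wordList : List String) (pronDict : List (String × List String)) (addSilence : Bool) (addShortPause : Bool), Dom_words2phones wordList pronDict addSilence addShortPause → Pre_words2phones wordList pronDict addSilence addShortPause → Spec_words2phones wordList pronDict addSilence addShortPause (words2phones wordList pronDict addSilence addShortPause)

-- ===== LEMMAS AND PROOFS =====

-- A's indexed loop over the remaining suffix (whose indices end at n) equals a
-- separator-join ('sp' before every group but the first) when the flag is on,
-- and a plain flatMap when it is off.
theorem loopA (pd : List (String × List String)) (b : Bool) (n : Int) :
    ∀ (ws : List String) (s : Int) (acc : List String), s + ws.length = n →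
      (PySem.List.enumerate ws s).foldl
        (fun acc iw =>
          if b && iw.1 != n - 1 then acc ++ pvLookup pd (PySem.Str.lower iw.2) ++ ["sp"]
          else acc ++ pvLookup pd (PySem.Str.lower iw.2)) acc
      = acc ++ (if b then
          (match ws with
           | [] => []
           | w :: r => pvLookup pd (PySem.Str.lower w) ++ r.flatMap (fun x => "sp" :: pvLookup pd (PySem.Str.lower x)))
          else ws.flatMap (fun w => pvLookup pd (PySem.Str.lower w))) := by
  intro ws
  induction ws with
  | nil => intro s acc _; cases b <;> simp [PySem.List.enumerate_nil]
  | cons w r ih =>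
    intro s acc hs
    rw [PySem.List.enumerate_cons]
    simp only [List.foldl_cons]
    cases b with
    | false =>
      rw [ih (s + 1) _ (by simp at hs ⊢; omega)]
      simp [List.flatMap]
    | true =>
      cases r with
      | nil =>
        have hsn : s = n - 1 := by simp at hs; omega
        simp [hsn, PySem.List.enumerate_nil]
      | cons x xs =>
        have hne : s ≠ n - 1 := by simp at hs; omega
        rw [ih (s + 1) _ (by simp at hs ⊢; omega)]
        simp [hne, List.flatMap]

theorem words2phones_eq (wordList : List String) (pronDict : List (String × List String)) (addSilence : Bool) (addShortPause : Bool) :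
    words2phones wordList pronDict addSilence addShortPause = words2phones_alt wordList pronDict addSilence addShortPause := by
  simp only [words2phones, words2phones_alt]
  rw [loopA pronDict addShortPause (wordList.length : Int) wordList 0 [] (by simp)]
  cases addShortPause <;> cases wordList <;>
    simp [List.flatMap, List.map_map, Function.comp_def]

-- ===== VERDICT (by name: the statement is the Claim_ definition above) =====
theorem words2phones_spec : Claim_equal_words2phones := by
  intro wordList pronDict addSilence addShortPause _ _
  unfold Spec_words2phones
  exact words2phones_eq wordList pronDict addSilence addShortPause
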